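-- pv_equiv track=rewrite | github.com/drothermel/genfxn | old_ref_impl/core/spec_space.py | _stateful_predicate_class_counts
-- ===== SOURCE A (Python) =====
-- from collections.abc import Callable, Mapping
--
-- def _stateful_predicate_class_counts(
--     predicate_counts: Mapping[str, int],
-- ) -> dict[str, int]:
--     result = {
--         "parity": 0,
--         "comparison": 0,
--         "modular": 0,
--     }
--     for kind, count in predicate_counts.items():
--         if kind in {"even", "odd"}:
--             result["parity"] += count
--         elif kind == "mod_eq":
--             result["modular"] += count
--         else:
--             result["comparison"] += count
--     return result
-- ===== SOURCE B (Python) =====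
-- def _stateful_predicate_class_counts(predicate_counts):
--     parity = predicate_counts.get("even", 0) + predicate_counts.get("odd", 0)
--     modular = predicate_counts.get("mod_eq", 0)
--     comparison = sum(predicate_counts.values()) - parity - modular
--     return {"parity": parity, "comparison": comparison, "modular": modular}
-- ===== Notes on version B (the rewrite author's own statement) =====
-- stated objective: simpler
-- what changed: Replaces the per-item classifying loop with three targeted lookups (even+odd, mod_eq) plus one total sum, obtaining the comparison bucket as the complement total-parity-modular.
import Mathlib
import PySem

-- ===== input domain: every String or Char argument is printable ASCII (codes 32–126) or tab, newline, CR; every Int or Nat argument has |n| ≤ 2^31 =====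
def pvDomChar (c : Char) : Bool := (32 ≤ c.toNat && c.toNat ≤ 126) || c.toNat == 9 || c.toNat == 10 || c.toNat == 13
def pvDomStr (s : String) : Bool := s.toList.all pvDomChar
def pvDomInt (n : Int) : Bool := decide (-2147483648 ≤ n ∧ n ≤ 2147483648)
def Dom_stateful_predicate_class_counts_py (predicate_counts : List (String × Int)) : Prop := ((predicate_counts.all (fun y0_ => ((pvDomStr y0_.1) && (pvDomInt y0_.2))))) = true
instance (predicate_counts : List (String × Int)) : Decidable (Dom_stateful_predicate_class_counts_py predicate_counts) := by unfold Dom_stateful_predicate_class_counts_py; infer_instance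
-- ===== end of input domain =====

-- B replaces the per-item classifying loop with targeted lookups plus a complement
-- (total − parity − modular) for the "comparison" bucket; objective: simpler.

-- ===== PORT A =====
-- Literal transliteration of A: a result dict of three zeroed buckets, then one
-- classifying loop doing result[bucket] += count per item of the input dict.
def stateful_predicate_class_counts_py (predicate_counts : List (String × Int)) : List (String × Int) :=
  let result : PySem.Dict String Int :=
    PySem.Dict.ofList [("parity", 0), ("comparison", 0), ("modular", 0)]
  (predicate_counts.foldl (fun r kc =>
      if kc.1 == "even" || kc.1 == "odd" then r.modify "parity" 0 (· + kc.2)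
      else if kc.1 == "mod_eq" then r.modify "modular" 0 (· + kc.2)
      else r.modify "comparison" 0 (· + kc.2)) result).items

-- ===== PORT B =====
-- Transliteration of B: three .get lookups and sum(values()), comparison by complement.
def stateful_predicate_class_counts_py_alt (predicate_counts : List (String × Int)) : List (String × Int) :=
  let d : PySem.Dict String Int := PySem.Dict.mk predicate_counts
  let parity := d.getD "even" 0 + d.getD "odd" 0
  let modular := d.getD "mod_eq" 0
  let comparison := (predicate_counts.map Prod.snd).sum - parity - modular
  [("parity", parity), ("comparison", comparison), ("modular", modular)]

-- ===== PRECONDITION & SPEC =====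
-- Pre_ excludes association lists with duplicate keys: they cannot arise from a Python
-- dict (the parameter is a Mapping), and on them first-match lookup vs summing every
-- occurrence is an artefact of the list representation, not of either Python program.
def Pre_stateful_predicate_class_counts_py (predicate_counts : List (String × Int)) : Prop :=
  (predicate_counts.map Prod.fst).Nodup
instance (predicate_counts : List (String × Int)) : Decidable (Pre_stateful_predicate_class_counts_py predicate_counts) := by unfold Pre_stateful_predicate_class_counts_py; infer_instance

def pvWitness_stateful_predicate_class_counts_py : (List (String × Int)) :=
  [("even", 2), ("mod_eq", 5), ("lt", 7)]

def Spec_stateful_predicate_class_counts_py (predicate_counts : List (String × Int)) (out : List (String × Int)) : Prop := out = stateful_predicate_class_counts_py_alt predicate_counts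
instance (predicate_counts : List (String × Int)) (out : List (String × Int)) : Decidable (Spec_stateful_predicate_class_counts_py predicate_counts out) := by unfold Spec_stateful_predicate_class_counts_py; infer_instance

-- ===== CLAIM (what is proved, stated in full; the proofs are below) =====
def Claim_equal_stateful_predicate_class_counts_py : Prop := ∀ (predicate_counts : List (String × Int)), Dom_stateful_predicate_class_counts_py predicate_counts → Pre_stateful_predicate_class_counts_py predicate_counts → Spec_stateful_predicate_class_counts_py predicate_counts (stateful_predicate_class_counts_py predicate_counts)

-- ===== LEMMAS AND PROOFS =====

-- the three bucket sums A accumulates, computed directly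
def pvKeySum (k : String) : List (String × Int) → Int
  | [] => 0
  | (a, b) :: t => (if a == k then b else 0) + pvKeySum k t

theorem pvKeySum_eq_zero (k : String) (l : List (String × Int)) (h : k ∉ l.map Prod.fst) :
    pvKeySum k l = 0 := by
  induction l with
  | nil => rfl
  | cons p t ih =>
    simp only [List.map_cons, List.mem_cons, not_or] at h
    have hne : (p.1 == k) = false := by rw [beq_eq_false_iff_ne]; exact fun e => h.1 e.symm
    simp [pvKeySum, hne, ih h.2]

theorem getD_mk_eq_keySum (k : String) (l : List (String × Int))
    (h : (l.map Prod.fst).Nodup) : (PySem.Dict.mk l).getD k 0 = pvKeySum k l := by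
  induction l with
  | nil => simp [pvKeySum, PySem.Dict.getD, PySem.Dict.get?]
  | cons p t ih =>
    obtain ⟨a, b⟩ := p
    simp only [List.map_cons, List.nodup_cons] at h
    rw [PySem.Dict.getD_eq_get?_getD, PySem.Dict.get?_mk_cons]
    by_cases hk : a = k
    · subst hk
      simp [pvKeySum, pvKeySum_eq_zero a t h.1]
    · have hak : (a == k) = false := by simp [hk]
      simp only [hak, Bool.false_eq_true, if_false, pvKeySum]
      rw [← PySem.Dict.getD_eq_get?_getD, ih h.2]
      simp

-- A's fold, characterised over an arbitrary concrete three-bucket accumulator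
theorem foldA_items (l : List (String × Int)) : ∀ p c m : Int,
    (l.foldl (fun r kc =>
        if kc.1 == "even" || kc.1 == "odd" then r.modify "parity" 0 (· + kc.2)
        else if kc.1 == "mod_eq" then r.modify "modular" 0 (· + kc.2)
        else r.modify "comparison" 0 (· + kc.2))
      (PySem.Dict.mk [("parity", p), ("comparison", c), ("modular", m)])).items
    = [("parity", p + (pvKeySum "even" l + pvKeySum "odd" l)),
       ("comparison", c + (((l.map Prod.snd).sum - (pvKeySum "even" l + pvKeySum "odd" l)) - pvKeySum "mod_eq" l)),
       ("modular", m + pvKeySum "mod_eq" l)] := by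
  induction l with
  | nil => intro p c m; simp [pvKeySum]
  | cons kc t ih =>
    intro p c m
    obtain ⟨a, b⟩ := kc
    simp only [List.foldl_cons]
    by_cases he : a = "even"
    · subst he
      have : ((PySem.Dict.mk [("parity", p), ("comparison", c), ("modular", m)]).modify "parity" 0 (· + b))
          = PySem.Dict.mk [("parity", p + b), ("comparison", c), ("modular", m)] := by
        apply PySem.Dict.ext; simp [PySem.Dict.modify, PySem.Dict.getD, PySem.Dict.get?,
          PySem.Dict.insert, PySem.Dict.contains]
      simp only [show (("even" == "even" || "even" == "odd") = true) by decide, if_true, this, ih]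
      simp [pvKeySum]; omega
    · by_cases ho : a = "odd"
      · subst ho
        have : ((PySem.Dict.mk [("parity", p), ("comparison", c), ("modular", m)]).modify "parity" 0 (· + b))
            = PySem.Dict.mk [("parity", p + b), ("comparison", c), ("modular", m)] := by
          apply PySem.Dict.ext; simp [PySem.Dict.modify, PySem.Dict.getD, PySem.Dict.get?,
            PySem.Dict.insert, PySem.Dict.contains]
        simp only [show (("odd" == "even" || "odd" == "odd") = true) by decide, if_true, this, ih]
        simp [pvKeySum]; omega
      · by_cases hm : a = "mod_eq"
        · subst hm
          have : ((PySem.Dict.mk [("parity", p), ("comparison", c), ("modular", m)]).modify "modular" 0 (· + b))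
              = PySem.Dict.mk [("parity", p), ("comparison", c), ("modular", m + b)] := by
            apply PySem.Dict.ext; simp [PySem.Dict.modify, PySem.Dict.getD, PySem.Dict.get?,
              PySem.Dict.insert, PySem.Dict.contains]
          simp only [show (("mod_eq" == "even" || "mod_eq" == "odd") = false) by decide,
            show (("mod_eq" == "mod_eq") = true) by decide, if_true, Bool.false_eq_true, if_false, this, ih]
          simp [pvKeySum]; omega
        · have hb1 : ((a == "even" || a == "odd") = false) := by simp [he, ho]
          have hb2 : ((a == "mod_eq") = false) := by simp [hm]
          have : ((PySem.Dict.mk [("parity", p), ("comparison", c), ("modular", m)]).modify "comparison" 0 (· + b))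
              = PySem.Dict.mk [("parity", p), ("comparison", c + b), ("modular", m)] := by
            apply PySem.Dict.ext; simp [PySem.Dict.modify, PySem.Dict.getD, PySem.Dict.get?,
              PySem.Dict.insert, PySem.Dict.contains]
          simp only [hb1, hb2, Bool.false_eq_true, if_false, this, ih]
          simp [pvKeySum, he, ho, hm]; omega

-- ===== VERDICT (by name: the statement is the Claim_ definition above) =====
theorem stateful_predicate_class_counts_py_spec : Claim_equal_stateful_predicate_class_counts_py := by
  intro l _ hpre
  unfold Spec_stateful_predicate_class_counts_py
  unfold stateful_predicate_class_counts_py stateful_predicate_class_counts_py_alt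
  have hE := getD_mk_eq_keySum "even" l hpre
  have hO := getD_mk_eq_keySum "odd" l hpre
  have hM := getD_mk_eq_keySum "mod_eq" l hpre
  rw [show (PySem.Dict.ofList [("parity", (0:Int)), ("comparison", 0), ("modular", 0)])
      = PySem.Dict.mk [("parity", 0), ("comparison", 0), ("modular", 0)] from by decide]
  rw [foldA_items l 0 0 0]
  simp only [hE, hO, hM]
  simp
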